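-- pv_equiv track=rewrite | github.com/ttoino/advent-of-code | 2016/day04.py | part2
-- ===== SOURCE A (Python) =====
-- from string import ascii_lowercase
--
-- def part2(inp: list[tuple[str, int, str]]) -> int:
--     for name, id, _ in inp:
--         name = "".join(
--             " " if c == "-" else ascii_lowercase[(ascii_lowercase.index(c) + id) % 26]
--             for c in name[:-1]
--         )
--
--         if "north" in name:
--             return id
--
--     return -1
-- ===== SOURCE B (Python) =====
-- def part2(inp: list[tuple[str, int, str]]) -> int:
--     # Sliding-window scan: a window of the raw name decrypts to "north" iff each
--     # character is a non-dash whose ord differs from the target letter's ord by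
--     # -id modulo 26; no decrypted string (and no alphabet table) is ever built.
--     for name, id, _ in inp:
--         body = name[:-1]
--         for i in range(len(body) - 4):
--             if all(
--                 body[i + j] != "-"
--                 and (ord(body[i + j]) - ord("north"[j]) + id) % 26 == 0
--                 for j in range(5)
--             ):
--                 return id
--     return -1
-- ===== Notes on version B (the rewrite author's own statement) =====
-- stated objective: alternative
-- what changed: Instead of decrypting each whole room name into a new string and searching the decrypted copy for 'north', B slides a 5-wide window over the raw name[:-1] and tests each window in place with ord arithmetic modulo 26 (non-dash and ord(c) - ord(target letter) + id divisible by 26), building no decrypted string and using no alphabet table.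
-- outside the precondition, e.g. on part2([('northx', 0, ''), ('A?', 1, '')]): A returns 0, B returns 0
import Mathlib
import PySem

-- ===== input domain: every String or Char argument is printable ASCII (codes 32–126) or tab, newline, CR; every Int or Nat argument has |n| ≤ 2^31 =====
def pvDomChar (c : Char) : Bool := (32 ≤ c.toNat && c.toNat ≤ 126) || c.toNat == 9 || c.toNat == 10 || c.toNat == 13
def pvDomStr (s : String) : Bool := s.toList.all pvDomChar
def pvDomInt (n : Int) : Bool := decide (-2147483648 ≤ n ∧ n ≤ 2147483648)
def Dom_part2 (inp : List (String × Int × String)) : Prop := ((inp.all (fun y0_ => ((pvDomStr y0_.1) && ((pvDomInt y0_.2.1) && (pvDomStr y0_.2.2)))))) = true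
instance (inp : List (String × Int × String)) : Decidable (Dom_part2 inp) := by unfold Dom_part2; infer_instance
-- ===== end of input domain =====

-- B scans each raw room name with a 5-wide sliding window and tests, by ord arithmetic mod 26,
-- whether that window decrypts to "north": no decrypted copy of the name and no alphabet table.

-- string.ascii_lowercase
def pvAbc : List Char :=
  ['a','b','c','d','e','f','g','h','i','j','k','l','m','n','o','p','q','r','s','t','u','v','w','x','y','z']

-- ===== PORT A =====
-- one character of the decrypting generator expression:
-- " " if c == "-" else ascii_lowercase[(ascii_lowercase.index(c) + id) % 26]
-- ascii_lowercase.index(c) is ported as Chars.find (exact when c is present, which Pre_part2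
-- guarantees; where Python raises ValueError the port's value is irrelevant).  The subscript
-- ascii_lowercase[k] has k = … % 26 ∈ [0, 26), so List.pyGet? is always `some`; .getD ' '
-- only discharges the Option.
def pvDecChar (id : Int) (c : Char) : Char :=
  if c = '-' then ' '
  else (PySem.List.pyGet? pvAbc (PySem.Int.mod (PySem.Chars.find pvAbc [c] + id) 26)).getD ' '

-- the for-loop with early return; strings handled on List Char ("".join of 1-char pieces)
def part2 (inp : List (String × Int × String)) : Int :=
  match inp with
  | [] => -1
  | (name, id, _) :: rest =>
    let dec := PySem.Chars.join []
      ((PySem.List.slice name.toList none (some (-1))).map (fun c => [pvDecChar id c]))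
    if PySem.Chars.isIn "north".toList dec then id else part2 rest

-- ===== PORT B =====
-- one conjunct of the window test:
-- body[i + j] != "-" and (ord(body[i + j]) - ord("north"[j]) + id) % 26 == 0
-- (the indices are always in range, so both pyGet? are `some`; the `none` arm is unreachable)
def pvCond (id : Int) (body : List Char) (i j : Int) : Bool :=
  match PySem.List.pyGet? body (i + j), PySem.List.pyGet? "north".toList j with
  | some c, some t => c ≠ '-' && PySem.Int.mod ((c.toNat : Int) - (t.toNat : Int) + id) 26 == 0
  | _, _ => false

def part2_alt (inp : List (String × Int × String)) : Int :=
  match inp with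
  | [] => -1
  | (name, id, _) :: rest =>
    let body := PySem.List.slice name.toList none (some (-1))
    if (PySem.List.pyRange 0 ((body.length : Int) - 4) 1).any (fun i =>
         (PySem.List.pyRange 0 5 1).all (fun j => pvCond id body i j))
    then id else part2_alt rest

-- ===== PRECONDITION & SPEC =====
-- Pre_part2 excludes inputs where some room name (apart from its last character) contains a
-- character other than '-' or a lowercase letter: on such characters A's ascii_lowercase.index
-- raises ValueError.  (For closed form the condition is required of every room, so a few inputs
-- where A returns from an earlier room before reaching a bad one are also excluded.)
def Pre_part2 (inp : List (String × Int × String)) : Prop :=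
  (inp.all (fun r => (r.1.toList.dropLast).all (fun c => c == '-' || pvAbc.contains c))) = true
instance (inp : List (String × Int × String)) : Decidable (Pre_part2 inp) := by
  unfold Pre_part2; infer_instance

def pvWitness_part2 : (List (String × Int × String)) := [("north-", 0, "x")]

def Spec_part2 (inp : List (String × Int × String)) (out : Int) : Prop := out = part2_alt inp
instance (inp : List (String × Int × String)) (out : Int) : Decidable (Spec_part2 inp out) := by
  unfold Spec_part2; infer_instance

-- ===== CLAIM (what is proved, stated in full; the proofs are below) =====
def Claim_equal_part2 : Prop :=
  ∀ (inp : List (String × Int × String)), Dom_part2 inp → Pre_part2 inp → Spec_part2 inp (part2 inp)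

-- ===== LEMMAS AND PROOFS =====

-- the encrypted image of a query letter under shift -id (proof-side only; B computes none of this)
def pvEncChar (id : Int) (t : Char) : Char :=
  (PySem.List.pyGet? pvAbc (PySem.Int.mod (PySem.Chars.find pvAbc [t] - id) 26)).getD ' '

-- characterisation of find on the alphabet, for letters
lemma pv_find_mem {c : Char} (h : c ∈ pvAbc) :
    0 ≤ PySem.Chars.find pvAbc [c] ∧ PySem.Chars.find pvAbc [c] < 26 ∧
      PySem.List.pyGet? pvAbc (PySem.Chars.find pvAbc [c]) = some c := by
  fin_cases h <;> refine ⟨by decide, by decide, by decide⟩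

-- a letter's code point is 97 plus its alphabet index
lemma pv_ord {c : Char} (h : c ∈ pvAbc) :
    (c.toNat : Int) = 97 + PySem.Chars.find pvAbc [c] := by
  fin_cases h <;> decide

-- find after get: the index of the k-th letter is k
lemma pv_find_get (k : Nat) (hk : k < 26) :
    PySem.Chars.find pvAbc [(PySem.List.pyGet? pvAbc (k : Int)).getD ' '] = (k : Int) := by
  interval_cases k <;> decide

lemma pv_mod26_bounds (x : Int) : 0 ≤ PySem.Int.mod x 26 ∧ PySem.Int.mod x 26 < 26 := by
  simp [PySem.Int.mod, Int.fmod_eq_emod]; omega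

lemma pv_get_mod_mem (x : Int) :
    (PySem.List.pyGet? pvAbc (PySem.Int.mod x 26)).getD ' ' ∈ pvAbc := by
  obtain ⟨h0, h1⟩ := pv_mod26_bounds x
  rw [← Int.toNat_of_nonneg h0, PySem.List.pyGet?_natCast]
  have hlt : (PySem.Int.mod x 26).toNat < pvAbc.length := by simp [pvAbc]; omega
  rw [List.getElem?_eq_getElem hlt]
  exact List.getElem_mem _

lemma pv_enc_mem (id : Int) (t : Char) : pvEncChar id t ∈ pvAbc := pv_get_mod_mem _

lemma pv_dash_not_mem : '-' ∉ pvAbc := by decide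

lemma pv_north_chars : ∀ t ∈ "north".toList, t ∈ pvAbc := by
  have h : "north".toList = ['n','o','r','t','h'] := rfl
  rw [h]; simp [pvAbc]

-- decrypting a letter c yields the query letter t exactly when c is t's encrypted image
lemma pv_dec_eq_iff (id : Int) {c t : Char} (hc : c ∈ pvAbc) (ht : t ∈ pvAbc) :
    pvDecChar id c = t ↔ c = pvEncChar id t := by
  obtain ⟨hk0, hk1, hkget⟩ := pv_find_mem hc
  obtain ⟨hm0, hm1, hmget⟩ := pv_find_mem ht
  have hne : c ≠ '-' := fun h => pv_dash_not_mem (h ▸ hc)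
  obtain ⟨d0, d1⟩ := pv_mod26_bounds (PySem.Chars.find pvAbc [c] + id)
  obtain ⟨e0, e1⟩ := pv_mod26_bounds (PySem.Chars.find pvAbc [t] - id)
  have hfd : PySem.Chars.find pvAbc [pvDecChar id c]
      = PySem.Int.mod (PySem.Chars.find pvAbc [c] + id) 26 := by
    unfold pvDecChar
    rw [if_neg hne, ← Int.toNat_of_nonneg d0, pv_find_get _ (by omega), Int.toNat_of_nonneg d0]
  have hfe : PySem.Chars.find pvAbc [pvEncChar id t]
      = PySem.Int.mod (PySem.Chars.find pvAbc [t] - id) 26 := by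
    unfold pvEncChar
    rw [← Int.toNat_of_nonneg e0, pv_find_get _ (by omega), Int.toNat_of_nonneg e0]
  constructor
  · intro h
    have : PySem.Int.mod (PySem.Chars.find pvAbc [c] + id) 26 = PySem.Chars.find pvAbc [t] := by
      rw [← hfd, h]
    have hk : PySem.Chars.find pvAbc [c] = PySem.Int.mod (PySem.Chars.find pvAbc [t] - id) 26 := by
      simp only [PySem.Int.mod, Int.fmod_eq_emod] at this e0 e1 ⊢; omega
    have := hkget
    rw [hk, ← hfe] at this
    obtain ⟨_, _, hg⟩ := pv_find_mem (pv_enc_mem id t)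
    rw [hg] at this; exact (Option.some_inj.mp this).symm
  · intro h
    have hk : PySem.Chars.find pvAbc [c] = PySem.Int.mod (PySem.Chars.find pvAbc [t] - id) 26 := by
      rw [h, hfe]
    have hm : PySem.Int.mod (PySem.Chars.find pvAbc [c] + id) 26 = PySem.Chars.find pvAbc [t] := by
      simp only [PySem.Int.mod, Int.fmod_eq_emod] at hk hm0 hm1 ⊢; omega
    unfold pvDecChar
    rw [if_neg hne, hm, hmget]; rfl

-- the window conjunct holds exactly when the raw character is the encrypted query letter
lemma pv_cond_char (id : Int) {c t : Char} (hc : c = '-' ∨ c ∈ pvAbc) (ht : t ∈ "north".toList) :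
    (decide (c ≠ '-') && (PySem.Int.mod ((c.toNat : Int) - (t.toNat : Int) + id) 26 == 0))
      = (c == pvEncChar id t) := by
  have htA : t ∈ pvAbc := pv_north_chars t ht
  rcases hc with hc | hc
  · subst hc
    have : ('-' == pvEncChar id t) = false := by
      rw [beq_eq_false_iff_ne]
      exact fun h => pv_dash_not_mem (h ▸ pv_enc_mem id t)
    simp [this]
  · have hne : c ≠ '-' := fun h => pv_dash_not_mem (h ▸ hc)
    obtain ⟨hk0, hk1, _⟩ := pv_find_mem hc
    obtain ⟨hm0, hm1, hmget⟩ := pv_find_mem htA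
    obtain ⟨d0, d1⟩ := pv_mod26_bounds (PySem.Chars.find pvAbc [c] + id)
    have harith : PySem.Int.mod ((c.toNat : Int) - (t.toNat : Int) + id) 26 = 0
        ↔ PySem.Int.mod (PySem.Chars.find pvAbc [c] + id) 26 = PySem.Chars.find pvAbc [t] := by
      rw [pv_ord hc, pv_ord htA]
      simp only [PySem.Int.mod, Int.fmod_eq_emod]; omega
    have key : PySem.Int.mod (PySem.Chars.find pvAbc [c] + id) 26 = PySem.Chars.find pvAbc [t]
        ↔ pvDecChar id c = t := by
      constructor
      · intro h
        unfold pvDecChar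
        rw [if_neg hne, h, hmget]; rfl
      · intro h
        have hfd : PySem.Chars.find pvAbc [pvDecChar id c]
            = PySem.Int.mod (PySem.Chars.find pvAbc [c] + id) 26 := by
          unfold pvDecChar
          rw [if_neg hne, ← Int.toNat_of_nonneg d0, pv_find_get _ (by omega),
              Int.toNat_of_nonneg d0]
        rw [← hfd, h]
    rw [Bool.eq_iff_iff]
    simp only [Bool.and_eq_true, decide_eq_true_eq, beq_iff_eq]
    rw [harith, key, pv_dec_eq_iff id hc htA]
    exact ⟨And.right, fun h => ⟨hne, h⟩⟩

-- map of a pointwise-inverted composition is the identity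
lemma pv_map_comp_id (f g : Char → Char) (m : List Char) (hf : ∀ c ∈ m, f (g c) = c) :
    List.map (f ∘ g) m = m := by
  induction m with
  | nil => rfl
  | cons a l ih =>
    simp only [List.map_cons, Function.comp_apply, hf a (List.mem_cons_self ..)]
    rw [ih (fun c hc => hf c (List.mem_cons_of_mem _ hc))]

lemma pv_space_not_north : ' ' ∉ "north".toList := by
  have h : "north".toList = ['n','o','r','t','h'] := rfl
  rw [h]; simp

-- decrypting the encrypted query letter gives the letter back
lemma pv_dec_enc (id : Int) {t : Char} (ht : t ∈ pvAbc) : pvDecChar id (pvEncChar id t) = t :=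
  (pv_dec_eq_iff id (pv_enc_mem id t) ht).mpr rfl

-- encrypting a decrypted letter gives the letter back
lemma pv_enc_dec (id : Int) {c : Char} (hc : c ∈ pvAbc) : pvEncChar id (pvDecChar id c) = c := by
  have hne : c ≠ '-' := fun h => pv_dash_not_mem (h ▸ hc)
  have hd : pvDecChar id c ∈ pvAbc := by
    unfold pvDecChar; rw [if_neg hne]; exact pv_get_mod_mem _
  exact ((pv_dec_eq_iff id hc hd).mp rfl).symm

-- "north" occurs in the decrypted name iff the encrypted query occurs in the raw name
lemma pv_key (id : Int) (l : List Char) (hcl : ∀ c ∈ l, c = '-' ∨ c ∈ pvAbc) :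
    PySem.Chars.isIn "north".toList (l.map (pvDecChar id))
      = PySem.Chars.isIn ("north".toList.map (pvEncChar id)) l := by
  rw [Bool.eq_iff_iff, PySem.Chars.isIn_iff_infix, PySem.Chars.isIn_iff_infix]
  constructor
  · rintro ⟨s, t, hst⟩
    rw [List.append_assoc] at hst
    obtain ⟨l₁, l₂, hl, hmap1, hmap2⟩ := List.map_eq_append_iff.mp hst.symm
    obtain ⟨m, l₃, hl₂, hmapm, hmap3⟩ := List.map_eq_append_iff.mp hmap2
    have hmmem : ∀ c ∈ m, c ∈ pvAbc := by
      intro c hcm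
      rcases hcl c (by rw [hl, hl₂]; simp [hcm]) with hdash | habc
      · exfalso
        apply pv_space_not_north
        rw [← hmapm]
        exact List.mem_map.mpr ⟨c, hcm, by rw [hdash]; simp [pvDecChar]⟩
      · exact habc
    have hm : "north".toList.map (pvEncChar id) = m := by
      rw [← hmapm, List.map_map,
          pv_map_comp_id _ _ m (fun c hcm => pv_enc_dec id (hmmem c hcm))]
    exact ⟨l₁, l₃, by rw [hm, hl, hl₂, List.append_assoc]⟩
  · rintro ⟨s, t, hst⟩
    refine ⟨s.map (pvDecChar id), t.map (pvDecChar id), ?_⟩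
    rw [← hst]
    simp only [List.map_append, List.map_map]
    congr 2
    rw [pv_map_comp_id _ _ _ (fun c hcm => pv_dec_enc id (pv_north_chars c hcm))]

lemma pv_join_singletons (f : Char → Char) (l : List Char) :
    PySem.Chars.join [] (l.map (fun c => [f c])) = l.map f := by
  rw [show l.map (fun c => [f c]) = (l.map f).map (fun c => [c]) by simp,
      PySem.Chars.join_nil_singletons]

lemma pv_slice_dropLast (l : List Char) : PySem.List.slice l none (some (-1)) = l.dropLast := by
  simp [pysem]

lemma pv_north_len (id : Int) : ("north".toList.map (pvEncChar id)).length = 5 := by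
  simp [show "north".toList = ['n','o','r','t','h'] from rfl]

-- the window scan finds the encrypted query exactly where substring search does
lemma pv_window (id : Int) (body : List Char) (hcl : ∀ c ∈ body, c = '-' ∨ c ∈ pvAbc) :
    ((PySem.List.pyRange 0 ((body.length : Int) - 4) 1).any (fun i =>
        (PySem.List.pyRange 0 5 1).all (fun j => pvCond id body i j)))
      = PySem.Chars.isIn ("north".toList.map (pvEncChar id)) body := by
  set p := "north".toList.map (pvEncChar id) with hp
  have hp5 : p.length = 5 := pv_north_len id
  rw [Bool.eq_iff_iff, List.any_eq_true, ← PySem.Chars.exists_prefix_drop_iff_isIn]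
  constructor
  · rintro ⟨i, hi, hall⟩
    rw [PySem.List.mem_pyRange_one] at hi
    obtain ⟨hi0, hi1⟩ := hi
    set n := i.toNat with hn
    have hni : (n : Int) = i := Int.toNat_of_nonneg hi0
    have hnb : n + 5 ≤ body.length := by omega
    refine ⟨n, ?_⟩
    rw [List.prefix_iff_eq_take]
    apply List.ext_getElem
    · simp [hp5, hn]; omega
    · intro j hj1 hj2
      have hj5 : j < 5 := by rw [hp5] at hj1; omega
      rw [List.all_eq_true] at hall
      have hcj := hall (j : Int) (by rw [PySem.List.mem_pyRange_one]; omega)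
      have hbr : n + j < body.length := by omega
      have hg1 : PySem.List.pyGet? body (i + j) = some body[n + j] := by
        rw [← hni, show ((n : Int) + j) = ((n + j : Nat) : Int) by push_cast; ring,
            PySem.List.pyGet?_natCast, List.getElem?_eq_getElem hbr]
      have hg2 : PySem.List.pyGet? "north".toList (j : Int) = some ("north".toList[j]'(by
          simp [show "north".toList = ['n','o','r','t','h'] from rfl]; omega)) := by
        rw [PySem.List.pyGet?_natCast, List.getElem?_eq_getElem]
      simp only [pvCond, hg1, hg2] at hcj
      rw [pv_cond_char id (hcl _ (List.getElem_mem hbr))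
          (List.getElem_mem _)] at hcj
      have := beq_iff_eq.mp hcj
      simp only [List.getElem_take, List.getElem_drop, hp, List.getElem_map]
      exact this.symm
  · rintro ⟨n, hpre⟩
    have hlen : p.length ≤ (body.drop n).length := hpre.length_le
    rw [hp5, List.length_drop] at hlen
    have hnb : n + 5 ≤ body.length := by omega
    refine ⟨(n : Int), by rw [PySem.List.mem_pyRange_one]; omega, ?_⟩
    rw [List.all_eq_true]
    intro j hj
    rw [PySem.List.mem_pyRange_one] at hj
    obtain ⟨hj0, hj1⟩ := hj
    set jn := j.toNat with hjn
    have hji : (jn : Int) = j := Int.toNat_of_nonneg hj0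
    have hjn5 : jn < 5 := by omega
    have hbr : n + jn < body.length := by omega
    have hg1 : PySem.List.pyGet? body ((n : Int) + j) = some body[n + jn] := by
      rw [← hji, show ((n : Int) + (jn : Int)) = ((n + jn : Nat) : Int) by push_cast; ring,
          PySem.List.pyGet?_natCast, List.getElem?_eq_getElem hbr]
    have hg2 : PySem.List.pyGet? "north".toList j = some ("north".toList[jn]'(by
        simp [show "north".toList = ['n','o','r','t','h'] from rfl]; omega)) := by
      rw [← hji, PySem.List.pyGet?_natCast, List.getElem?_eq_getElem]
    simp only [pvCond, hg1, hg2]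
    rw [pv_cond_char id (hcl _ (List.getElem_mem hbr)) (List.getElem_mem _)]
    rw [beq_iff_eq]
    have hpj : p[jn]'(by rw [hp5]; omega) = body[n + jn] := by
      have := hpre.getElem (i := jn) (by rw [hp5]; omega)
      rw [List.getElem_drop] at this
      exact this
    rw [← hpj]
    simp only [hp]
    rcases show jn = 0 ∨ jn = 1 ∨ jn = 2 ∨ jn = 3 ∨ jn = 4 by omega with h | h | h | h | h <;>
      simp [h]

lemma pv_aux : ∀ inp, (∀ r ∈ inp, ∀ c ∈ r.1.toList.dropLast, c = '-' ∨ c ∈ pvAbc) →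
    part2 inp = part2_alt inp := by
  intro inp
  induction inp with
  | nil => intro _; rfl
  | cons hd tl ih =>
    intro hpre
    obtain ⟨name, id, ex⟩ := hd
    have hclean : ∀ c ∈ PySem.List.slice name.toList none (some (-1)), c = '-' ∨ c ∈ pvAbc := by
      rw [pv_slice_dropLast]
      exact hpre (name, id, ex) (List.mem_cons_self ..)
    simp only [part2, part2_alt]
    rw [pv_join_singletons, pv_key id _ hclean, ← pv_window id _ hclean]
    split
    · rfl
    · exact ih (fun r hr => hpre r (List.mem_cons_of_mem _ hr))

-- ===== VERDICT (by name: the statement is the Claim_ definition above) =====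
theorem part2_spec : Claim_equal_part2 := by
  intro inp _ hpre
  unfold Pre_part2 at hpre
  simp only [List.all_eq_true, Bool.or_eq_true, beq_iff_eq, List.contains_iff_mem] at hpre
  exact pv_aux inp hpre
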